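-- pv_equiv track=rewrite | github.com/ChanggiJeon/algo_study | 23.04.03~04.07/hja/조이스틱.py | solution
-- ===== SOURCE A (Python) =====
-- name = 'JEROEN'
--
-- def solution(name):
--     answer = 0
--
--     list_n = [min(abs(ord('A')-ord(n)), 26-abs(ord('A')-ord(n))) for n in name]
--     answer += sum(list_n)
--
--     min_move = len(name) - 1  # 최소 좌우 이동 횟수는 길이 - 1
--
--     for i in range(len(name)):
--
--         # 연속된 A 문자열 찾기
--         next = i + 1
--         while next < len(name) and name[next] == 'A':
--             next += 1
--         min_move = min([min_move, 2 * i + len(name) -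
--                        next, i + 2 * (len(name) - next)])
--
--     answer += min_move
--
--     return answer
-- ===== SOURCE B (Python) =====
-- def solution(name):
--     n = len(name)
--     answer = 0
--     min_move = n - 1
--     nxt = n  # index of first non-'A' strictly after current position (n if none)
--     for i in range(n - 1, -1, -1):
--         answer += min(abs(ord(name[i]) - 65), 26 - abs(ord(name[i]) - 65))
--         min_move = min(min_move, 2 * i + n - nxt, i + 2 * (n - nxt))
--         if name[i] != 'A':
--             nxt = i
--     return answer + min_move
-- ===== Notes on version B (the rewrite author's own statement) =====
-- stated objective: alternative
-- what changed: B replaces the inner while-loop that rescans for the next non-A character at every position with a single reverse pass that threads that index (and the vertical-move sum) through one loop.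
import Mathlib
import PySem

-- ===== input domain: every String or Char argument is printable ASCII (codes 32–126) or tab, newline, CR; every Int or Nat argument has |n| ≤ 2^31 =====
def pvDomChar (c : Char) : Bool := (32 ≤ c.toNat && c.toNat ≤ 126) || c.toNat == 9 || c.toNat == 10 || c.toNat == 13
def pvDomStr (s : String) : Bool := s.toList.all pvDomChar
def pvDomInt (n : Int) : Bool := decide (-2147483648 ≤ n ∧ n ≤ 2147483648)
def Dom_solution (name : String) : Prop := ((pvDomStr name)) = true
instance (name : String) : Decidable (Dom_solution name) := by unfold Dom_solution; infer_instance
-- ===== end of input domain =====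

-- B threads the next non-A index through one reverse pass instead of rescanning it with an
-- inner loop at every position (objective: alternative).

-- ===== PORT A =====
-- the inner `while next < len(name) and name[next] == 'A': next += 1` loop of A
def pvFindNext (s : List Char) (next : Nat) : Nat :=
  if h : next < s.length then
    if s[next] = 'A' then pvFindNext s (next + 1) else next
  else next
termination_by s.length - next

def solution (name : String) : Int :=
  let s := name.toList
  let n := s.length
  let answer : Int := (s.map (fun c => min |(65 : Int) - (c.toNat : Int)| (26 - |(65 : Int) - (c.toNat : Int)|))).sum
  let min_move : Int := (List.range n).foldl
    (fun m i =>
      let next := pvFindNext s (i + 1)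
      min (min m (2 * (i : Int) + (n : Int) - (next : Int))) ((i : Int) + 2 * ((n : Int) - (next : Int))))
    ((n : Int) - 1)
  answer + min_move

-- ===== PORT B =====
-- one reverse pass over i = k-1, k-2, …, 0; state = (nxt, answer, min_move).
-- s.getD k 'A' is always an in-range access (k < s.length at every call).
def pvLoopB (s : List Char) (n : Nat) : Nat → Nat × Int × Int → Nat × Int × Int
  | 0, st => st
  | k + 1, (nxt, ans, mm) =>
      let c := s.getD k 'A'
      let ans' := ans + min |(c.toNat : Int) - 65| (26 - |(c.toNat : Int) - 65|)
      let mm' := min (min mm (2 * (k : Int) + (n : Int) - (nxt : Int))) ((k : Int) + 2 * ((n : Int) - (nxt : Int)))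
      let nxt' := if c ≠ 'A' then k else nxt
      pvLoopB s n k (nxt', ans', mm')

def solution_alt (name : String) : Int :=
  let s := name.toList
  let n := s.length
  let st := pvLoopB s n n (n, 0, (n : Int) - 1)
  st.2.1 + st.2.2

-- ===== PRECONDITION & SPEC =====
def Spec_solution (name : String) (out : Int) : Prop := out = solution_alt name
instance (name : String) (out : Int) : Decidable (Spec_solution name out) := by unfold Spec_solution; infer_instance

-- ===== CLAIM (what is proved, stated in full; the proofs are below) =====
def Claim_equal_solution : Prop := ∀ (name : String), Dom_solution name → Spec_solution name (solution name)

-- ===== LEMMAS AND PROOFS =====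

-- the candidate-min step shared by both folds, with the "next non-A" value as a parameter
def pvStep (n : Nat) (i nxt : Nat) (m : Int) : Int :=
  min (min m (2 * (i : Int) + (n : Int) - (nxt : Int))) ((i : Int) + 2 * ((n : Int) - (nxt : Int)))

lemma pvStep_as_min (n i nxt : Nat) (m : Int) :
    pvStep n i nxt m = min m (min (2 * (i : Int) + (n : Int) - (nxt : Int)) ((i : Int) + 2 * ((n : Int) - (nxt : Int)))) := by
  simp [pvStep, min_assoc]

lemma pvFindNext_stop (s : List Char) : pvFindNext s s.length = s.length := by
  unfold pvFindNext; simp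

lemma pvFindNext_unfold (s : List Char) (k : Nat) (hk : k < s.length) :
    pvFindNext s k = if s.getD k 'A' ≠ 'A' then k else pvFindNext s (k + 1) := by
  rw [pvFindNext]
  rw [List.getD_eq_getElem _ _ hk]
  by_cases h : s[k] = 'A' <;> simp [hk, h]

lemma pvFoldl_min_pull (H : Nat → Int) (l : List Nat) (a b : Int) :
    l.foldl (fun m i => min m (H i)) (min a b) = min (l.foldl (fun m i => min m (H i)) a) b := by
  induction l generalizing a with
  | nil => rfl
  | cons c l ih =>
      simp only [List.foldl_cons]
      rw [min_right_comm a b (H c), ih]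

lemma pvFoldl_min_reverse (H : Nat → Int) (l : List Nat) (a : Int) :
    l.reverse.foldl (fun m i => min m (H i)) a = l.foldl (fun m i => min m (H i)) a := by
  induction l generalizing a with
  | nil => rfl
  | cons c l ih =>
      simp only [List.reverse_cons, List.foldl_append, List.foldl_cons, List.foldl_nil]
      rw [ih, ← pvFoldl_min_pull]

-- B's loop with nxt seeded correctly computes the same min fold as A (over the reversed range)
-- and the vertical-move sum over the first k characters.
lemma pvLoopB_spec (s : List Char) (k : Nat) (hk : k ≤ s.length) (ans mm : Int) :
    pvLoopB s s.length k (pvFindNext s k, ans, mm) =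
      (pvFindNext s 0,
       ans + ((s.take k).map (fun c => min |(c.toNat : Int) - 65| (26 - |(c.toNat : Int) - 65|))).sum,
       (List.range k).reverse.foldl (fun m i => pvStep s.length i (pvFindNext s (i + 1)) m) mm) := by
  induction k generalizing ans mm with
  | zero => simp [pvLoopB]
  | succ k ih =>
      have hklt : k < s.length := hk
      rw [pvLoopB]
      have hnxt : (if s.getD k 'A' ≠ 'A' then k else pvFindNext s (k + 1)) = pvFindNext s k :=
        (pvFindNext_unfold s k hklt).symm
      simp only [hnxt]
      rw [ih (Nat.le_of_lt hklt)]
      have htake : s.take (k + 1) = s.take k ++ [s[k]] := by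
        rw [List.take_add_one]
        simp [List.getElem?_eq_getElem hklt]
      have hrange : (List.range (k + 1)).reverse = k :: (List.range k).reverse := by
        rw [List.range_succ, List.reverse_append]; rfl
      refine Prod.ext rfl (Prod.ext ?_ ?_)
      · rw [htake, List.map_append, List.sum_append]
        rw [List.getD_eq_getElem _ _ hklt]
        simp only [List.map_cons, List.map_nil, List.sum_cons, List.sum_nil]
        ring
      · simp only [hrange, List.foldl_cons]
        rfl

theorem solution_eq_alt (name : String) : solution name = solution_alt name := by
  unfold solution solution_alt
  dsimp only
  have h0 : pvFindNext name.toList name.toList.length = name.toList.length := pvFindNext_stop _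
  rw [show ((name.toList.length : Nat), (0 : Int), ((name.toList.length : Int) - 1)) =
        (pvFindNext name.toList name.toList.length, (0 : Int), ((name.toList.length : Int) - 1)) from by
      rw [h0]]
  rw [pvLoopB_spec name.toList name.toList.length le_rfl 0 ((name.toList.length : Int) - 1)]
  dsimp only
  rw [List.take_length, zero_add]
  have hH : ∀ (l : List Nat),
      l.foldl (fun (m : Int) (i : Nat) => pvStep name.toList.length i (pvFindNext name.toList (i + 1)) m)
          ((name.toList.length : Int) - 1) =
      l.foldl (fun (m : Int) (i : Nat) =>
          min m (min (2 * (i : Int) + (name.toList.length : Int) - (pvFindNext name.toList (i + 1) : Int))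
            ((i : Int) + 2 * ((name.toList.length : Int) - (pvFindNext name.toList (i + 1) : Int)))))
          ((name.toList.length : Int) - 1) := by
    intro l
    have hf : (fun (m : Int) (i : Nat) => pvStep name.toList.length i (pvFindNext name.toList (i + 1)) m) =
        (fun (m : Int) (i : Nat) =>
          min m (min (2 * (i : Int) + (name.toList.length : Int) - (pvFindNext name.toList (i + 1) : Int))
            ((i : Int) + 2 * ((name.toList.length : Int) - (pvFindNext name.toList (i + 1) : Int))))) := by
      funext m i; exact pvStep_as_min _ _ _ _
    rw [hf]
  rw [hH, pvFoldl_min_reverse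
    (fun i => min (2 * (i : Int) + (name.toList.length : Int) - (pvFindNext name.toList (i + 1) : Int))
      ((i : Int) + 2 * ((name.toList.length : Int) - (pvFindNext name.toList (i + 1) : Int))))]
  congr 1
  · apply congrArg List.sum
    apply List.map_congr_left
    intro c _
    rw [abs_sub_comm]
  · have hf : (fun (m : Int) (i : Nat) =>
          min m (min (2 * (i : Int) + (name.toList.length : Int) - (pvFindNext name.toList (i + 1) : Int))
            ((i : Int) + 2 * ((name.toList.length : Int) - (pvFindNext name.toList (i + 1) : Int))))) =
        (fun (m : Int) (i : Nat) => pvStep name.toList.length i (pvFindNext name.toList (i + 1)) m) := by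
      funext m i; exact (pvStep_as_min _ _ _ _).symm
    rw [hf]
    rfl

-- ===== VERDICT (by name: the statement is the Claim_ definition above) =====
theorem solution_spec : Claim_equal_solution := by
  intro name _
  unfold Spec_solution
  exact solution_eq_alt name
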